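-- pv_equiv track=rewrite | github.com/GretaAsksMarkus/estonian-extension | backend/server.py | extract_case_from_form
-- ===== SOURCE A (Python) =====
-- CASE_ALIASES = {
--     "nom": {"n", "nom"},
--     "gen": {"g", "gen"},
--     "par": {"p", "par"},
--
--     "ill": {"ill"},
--     "ine": {"ine", "in"},      # some taggers use "in"
--     "ela": {"ela", "el"},      # some taggers use "el"
--
--     "all": {"all"},
--     "ade": {"ade", "ad"},      # some taggers use "ad"
--     "abl": {"abl"},
--
--     "tra": {"tra", "tr"},      # some taggers use "tr"
--     "ter": {"ter"},
--     "ess": {"ess", "es"},      # some taggers use "es"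
--     "abe": {"abe", "ab"},      # some taggers use "ab"
--     "kom": {"kom", "com"},     # UD uses Comitative=Com, some use kom
-- }
--
-- def extract_case_from_form(form: str) -> str | None:
--     """
--     EstNLTK 'form' is usually a space-separated set of tags.
--     Example-ish: "sg g", "pl el", "sg ill", etc.
--     We map multiple possible aliases into canonical keys (nom/gen/par/ill/.../kom).
--     """
--     if not form:
--         return None
--
--     parts = set(form.lower().strip().split())
--     if not parts:
--         return None
--
--     # Check in a stable priority order
--     order = ["nom","gen","par","ill","ine","ela","all","ade","abl","tra","ter","ess","abe","kom"]
--     for canonical in order: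
--         if parts & CASE_ALIASES[canonical]:
--             return canonical
--
--     return None
-- ===== SOURCE B (Python) =====
-- # Reverse lookup: alias -> (priority index, canonical case), derived once from
-- # the priority order nom,gen,par,ill,ine,ela,all,ade,abl,tra,ter,ess,abe,kom.
-- _CASE_LOOKUP = {
--     "n": (0, "nom"), "nom": (0, "nom"),
--     "g": (1, "gen"), "gen": (1, "gen"),
--     "p": (2, "par"), "par": (2, "par"),
--     "ill": (3, "ill"),
--     "ine": (4, "ine"), "in": (4, "ine"),
--     "ela": (5, "ela"), "el": (5, "ela"),
--     "all": (6, "all"),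
--     "ade": (7, "ade"), "ad": (7, "ade"),
--     "abl": (8, "abl"),
--     "tra": (9, "tra"), "tr": (9, "tra"),
--     "ter": (10, "ter"),
--     "ess": (11, "ess"), "es": (11, "ess"),
--     "abe": (12, "abe"), "ab": (12, "abe"),
--     "kom": (13, "kom"), "com": (13, "kom"),
-- }
--
-- def extract_case_from_form(form):
--     if not form:
--         return None
--     best = None
--     for tok in form.lower().strip().split():
--         hit = _CASE_LOOKUP.get(tok)
--         if hit is not None and (best is None or hit[0] < best[0]):
--             best = hit
--     return None if best is None else best[1]
-- ===== Notes on version B (the rewrite author's own statement) =====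
-- stated objective: idiomatic
-- what changed: Replaces the scan over the 14-entry canonical table with set intersections by a single pass over the input tokens against a precomputed reverse alias->(priority, canonical) index, keeping the match of minimal priority.
import Mathlib
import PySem

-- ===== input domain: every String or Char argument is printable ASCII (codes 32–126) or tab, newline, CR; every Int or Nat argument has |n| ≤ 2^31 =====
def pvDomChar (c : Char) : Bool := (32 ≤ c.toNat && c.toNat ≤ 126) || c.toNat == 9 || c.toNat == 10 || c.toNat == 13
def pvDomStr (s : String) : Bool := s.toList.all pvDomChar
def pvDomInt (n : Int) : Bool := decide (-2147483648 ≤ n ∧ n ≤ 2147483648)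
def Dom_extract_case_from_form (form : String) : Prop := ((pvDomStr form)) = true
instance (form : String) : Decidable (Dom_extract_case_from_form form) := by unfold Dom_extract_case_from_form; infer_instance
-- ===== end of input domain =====

-- B replaces A's scan over the canonical-case table (a set intersection per case) by a single
-- pass over the input tokens against a precomputed reverse alias → (priority, canonical) index,
-- keeping the hit of minimal priority; same return value, objective: idiomatic single pass.

-- ===== PORT A =====
-- CASE_ALIASES : dict[str, set[str]]
def pvCaseAliases : PySem.Dict String (PySem.Set String) := PySem.Dict.mk
  [("nom", ["n","nom"]), ("gen", ["g","gen"]), ("par", ["p","par"]),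
   ("ill", ["ill"]), ("ine", ["ine","in"]), ("ela", ["ela","el"]),
   ("all", ["all"]), ("ade", ["ade","ad"]), ("abl", ["abl"]),
   ("tra", ["tra","tr"]), ("ter", ["ter"]), ("ess", ["ess","es"]),
   ("abe", ["abe","ab"]), ("kom", ["kom","com"])]

-- order = [...]
def pvOrder : List String := ["nom","gen","par","ill","ine","ela","all","ade","abl","tra","ter","ess","abe","kom"]

-- the `for canonical in order` loop; `CASE_ALIASES[canonical]` always hits an existing key
-- (every element of pvOrder is a key of pvCaseAliases), so `.getD []` is exact here
def pvLoopA (parts : PySem.Set String) : List String → Option String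
  | [] => none
  | canonical :: rest =>
    if PySem.Set.inter parts ((PySem.Dict.get? pvCaseAliases canonical).getD []) ≠ [] then
      some canonical
    else pvLoopA parts rest

def extract_case_from_form (form : String) : Option String :=
  if form = "" then none
  else
    let parts : PySem.Set String :=
      PySem.Set.ofList (PySem.Str.split₀ (PySem.Str.strip (PySem.Str.lower form)))
    if parts = [] then none
    else pvLoopA parts pvOrder

-- ===== PORT B =====
-- _CASE_LOOKUP : dict[str, tuple[int, str]]
def pvCaseLookup : PySem.Dict String (Int × String) := PySem.Dict.mk
  [("n",(0,"nom")), ("nom",(0,"nom")), ("g",(1,"gen")), ("gen",(1,"gen")),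
   ("p",(2,"par")), ("par",(2,"par")), ("ill",(3,"ill")),
   ("ine",(4,"ine")), ("in",(4,"ine")), ("ela",(5,"ela")), ("el",(5,"ela")),
   ("all",(6,"all")), ("ade",(7,"ade")), ("ad",(7,"ade")), ("abl",(8,"abl")),
   ("tra",(9,"tra")), ("tr",(9,"tra")), ("ter",(10,"ter")),
   ("ess",(11,"ess")), ("es",(11,"ess")), ("abe",(12,"abe")), ("ab",(12,"abe")),
   ("kom",(13,"kom")), ("com",(13,"kom"))]

-- one iteration of B's `for tok in ...` loop body, updating `best`
def pvStepB (best : Option (Int × String)) (tok : String) : Option (Int × String) :=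
  match PySem.Dict.get? pvCaseLookup tok with
  | none => best
  | some hit =>
    match best with
    | none => some hit
    | some b => if hit.1 < b.1 then some hit else best

def extract_case_from_form_alt (form : String) : Option String :=
  if form = "" then none
  else
    match (PySem.Str.split₀ (PySem.Str.strip (PySem.Str.lower form))).foldl pvStepB none with
    | none => none
    | some b => some b.2

-- ===== PRECONDITION & SPEC =====
def Spec_extract_case_from_form (form : String) (out : Option String) : Prop := out = extract_case_from_form_alt form
instance (form : String) (out : Option String) : Decidable (Spec_extract_case_from_form form out) := by unfold Spec_extract_case_from_form; infer_instance

-- ===== CLAIM (what is proved, stated in full; the proofs are below) =====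
def Claim_equal_extract_case_from_form : Prop := ∀ (form : String), Dom_extract_case_from_form form → Spec_extract_case_from_form form (extract_case_from_form form)

-- ===== LEMMAS AND PROOFS =====


-- the enumerated priority table (i, canonical), in priority order
def pvE : List (Int × String) :=
  [(0,"nom"), (1,"gen"), (2,"par"), (3,"ill"), (4,"ine"), (5,"ela"), (6,"all"),
   (7,"ade"), (8,"abl"), (9,"tra"), (10,"ter"), (11,"ess"), (12,"abe"), (13,"kom")]

-- ordered scan over a priority table: first entry some token maps to
def pvChain (toks : List String) : List (Int × String) → Option (Int × String)
  | [] => none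
  | e :: es =>
    if toks.any (fun t => PySem.Dict.get? pvCaseLookup t == some e) then some e
    else pvChain toks es

-- minimum by priority, first argument wins ties (the shape of B's update)
def pvMin : Option (Int × String) → Option (Int × String) → Option (Int × String)
  | none, y => y
  | some a, none => some a
  | some a, some b => if b.1 < a.1 then some b else some a

lemma pvMin_some_some (a b : Int × String) :
    pvMin (some a) (some b) = if b.1 < a.1 then some b else some a := rfl

lemma pvStepB_eq (best : Option (Int × String)) (tok : String) :
    pvStepB best tok = pvMin best (PySem.Dict.get? pvCaseLookup tok) := by
  unfold pvStepB pvMin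
  cases PySem.Dict.get? pvCaseLookup tok <;> cases best <;> rfl

lemma pvMin_none_right (a : Option (Int × String)) : pvMin a none = a := by
  cases a <;> rfl

lemma pvMin_assoc (a b c : Option (Int × String)) :
    pvMin (pvMin a b) c = pvMin a (pvMin b c) := by
  cases a <;> cases b <;> cases c <;> simp only [pvMin] <;> split_ifs <;>
    first | rfl | (simp only [pvMin] ; split_ifs <;> first | rfl | omega) | omega

lemma pvFold_min (toks : List String) : ∀ b : Option (Int × String),
    toks.foldl pvStepB b = pvMin b (toks.foldl pvStepB none) := by
  induction toks with
  | nil => intro b; simp [pvMin_none_right]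
  | cons t toks ih =>
    intro b
    simp only [List.foldl_cons, pvStepB_eq, ih (pvMin b _), ih (pvMin none _), pvMin_assoc]
    rfl

lemma pvChain_nil : ∀ es, pvChain [] es = none := by
  intro es; induction es with
  | nil => rfl
  | cons e es ih => simpa [pvChain] using ih

lemma pvChain_mem {toks : List String} : ∀ {es e}, pvChain toks es = some e → e ∈ es := by
  intro es
  induction es with
  | nil => intro e h; simp [pvChain] at h
  | cons a es ih =>
    intro e h
    simp only [pvChain] at h
    split at h
    · simp_all
    · exact List.mem_cons_of_mem _ (ih h)

lemma pvChain_consEq (toks : List String) (e : Int × String) (es : List (Int × String)) :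
    pvChain toks (e :: es) =
      if toks.any (fun t => PySem.Dict.get? pvCaseLookup t == some e) then some e
      else pvChain toks es := rfl

lemma pvChain_cons (t : String) (rest : List String) : ∀ es : List (Int × String),
    es.Pairwise (fun a b => a.1 < b.1) →
    (PySem.Dict.get? pvCaseLookup t = none ∨ ∃ e ∈ es, PySem.Dict.get? pvCaseLookup t = some e) →
    pvChain (t :: rest) es = pvMin (PySem.Dict.get? pvCaseLookup t) (pvChain rest es) := by
  intro es
  induction es with
  | nil =>
    intro _ hg
    rcases hg with hg | ⟨e, he, _⟩
    · simp [pvChain, hg, pvMin]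
    · simp at he
  | cons e es ih =>
    intro hp hg
    rw [List.pairwise_cons] at hp
    rw [pvChain_consEq, pvChain_consEq, List.any_cons]
    by_cases hgt : PySem.Dict.get? pvCaseLookup t = some e
    · rw [if_pos (by rw [Bool.or_eq_true]; exact Or.inl (by simpa using hgt))]
      by_cases h2 : (rest.any fun s => PySem.Dict.get? pvCaseLookup s == some e) = true
      · rw [if_pos h2, hgt, pvMin_some_some]; simp
      · rw [if_neg h2, hgt]
        rcases hc : pvChain rest es with _ | e'
        · rfl
        · have hlt := hp.1 e' (pvChain_mem hc)
          rw [pvMin_some_some, if_neg (not_lt.mpr (le_of_lt hlt))]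
    · by_cases h2 : (rest.any fun s => PySem.Dict.get? pvCaseLookup s == some e) = true
      · rw [if_pos (by rw [Bool.or_eq_true]; exact Or.inr h2), if_pos h2]
        rcases hgv : PySem.Dict.get? pvCaseLookup t with _ | x
        · rfl
        · have hx : x ∈ e :: es := by
            rcases hg with hg | ⟨e', he', hge⟩
            · rw [hgv] at hg; cases hg
            · rw [hgv] at hge; cases hge; exact he'
          have hxe : x ≠ e := fun h => hgt (by rw [hgv, h])
          have hxes : x ∈ es := by
            rcases List.mem_cons.mp hx with h | h
            · exact absurd h hxe
            · exact h
          rw [pvMin_some_some, if_pos (hp.1 x hxes)]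
      · rw [if_neg (by rw [Bool.or_eq_true]
                       rintro (h | h)
                       · exact hgt (by simpa using h)
                       · exact h2 h),
            if_neg h2]
        apply ih hp.2
        rcases hg with hg | ⟨e', he', hge⟩
        · exact Or.inl hg
        · rcases List.mem_cons.mp he' with rfl | he'
          · exact absurd hge hgt
          · exact Or.inr ⟨e', he', hge⟩

lemma pvGet?_mem {κ ν : Type} [BEq κ] : ∀ (l : List (κ × ν)) (k : κ) (v : ν),
    (PySem.Dict.mk l).get? k = some v → v ∈ l.map Prod.snd := by
  intro l
  induction l with
  | nil => intro k v h; simp [PySem.Dict.get?] at h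
  | cons p l ih =>
    intro k v h
    rw [show (PySem.Dict.mk (p :: l)) = PySem.Dict.mk ((p.1, p.2) :: l) by simp] at h
    rw [PySem.Dict.get?_mk_cons] at h
    split at h
    · simp_all
    · exact List.mem_cons_of_mem _ (ih k v h)

lemma pvG_mem (t : String) :
    PySem.Dict.get? pvCaseLookup t = none ∨ ∃ e ∈ pvE, PySem.Dict.get? pvCaseLookup t = some e := by
  rcases h : PySem.Dict.get? pvCaseLookup t with _ | e
  · exact Or.inl rfl
  · refine Or.inr ⟨e, ?_, rfl⟩
    have hm := pvGet?_mem _ t e h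
    have hsub : ∀ x ∈ (pvCaseLookup.items.map Prod.snd), x ∈ pvE := by decide
    exact hsub e hm

lemma pvE_sorted : pvE.Pairwise (fun a b => a.1 < b.1) := by decide

lemma pvFoldB_eq_chain (toks : List String) :
    toks.foldl pvStepB none = pvChain toks pvE := by
  induction toks with
  | nil => simp [pvChain_nil]
  | cons t rest ih =>
    rw [List.foldl_cons, pvStepB_eq, pvFold_min, ih,
      pvChain_cons t rest pvE pvE_sorted (pvG_mem t)]
    rfl

set_option maxHeartbeats 2000000 in
lemma pvG_char (x : String) :
    (x ∈ (["n","nom"] : List String) ↔ PySem.Dict.get? pvCaseLookup x = some ((0:Int),"nom")) ∧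
    (x ∈ (["g","gen"] : List String) ↔ PySem.Dict.get? pvCaseLookup x = some ((1:Int),"gen")) ∧
    (x ∈ (["p","par"] : List String) ↔ PySem.Dict.get? pvCaseLookup x = some ((2:Int),"par")) ∧
    (x ∈ (["ill"] : List String) ↔ PySem.Dict.get? pvCaseLookup x = some ((3:Int),"ill")) ∧
    (x ∈ (["ine","in"] : List String) ↔ PySem.Dict.get? pvCaseLookup x = some ((4:Int),"ine")) ∧
    (x ∈ (["ela","el"] : List String) ↔ PySem.Dict.get? pvCaseLookup x = some ((5:Int),"ela")) ∧
    (x ∈ (["all"] : List String) ↔ PySem.Dict.get? pvCaseLookup x = some ((6:Int),"all")) ∧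
    (x ∈ (["ade","ad"] : List String) ↔ PySem.Dict.get? pvCaseLookup x = some ((7:Int),"ade")) ∧
    (x ∈ (["abl"] : List String) ↔ PySem.Dict.get? pvCaseLookup x = some ((8:Int),"abl")) ∧
    (x ∈ (["tra","tr"] : List String) ↔ PySem.Dict.get? pvCaseLookup x = some ((9:Int),"tra")) ∧
    (x ∈ (["ter"] : List String) ↔ PySem.Dict.get? pvCaseLookup x = some ((10:Int),"ter")) ∧
    (x ∈ (["ess","es"] : List String) ↔ PySem.Dict.get? pvCaseLookup x = some ((11:Int),"ess")) ∧
    (x ∈ (["abe","ab"] : List String) ↔ PySem.Dict.get? pvCaseLookup x = some ((12:Int),"abe")) ∧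
    (x ∈ (["kom","com"] : List String) ↔ PySem.Dict.get? pvCaseLookup x = some ((13:Int),"kom")) := by
  by_cases h0 : x = "n"
  · subst h0; and_intros <;> decide
  by_cases h1 : x = "nom"
  · subst h1; and_intros <;> decide
  by_cases h2 : x = "g"
  · subst h2; and_intros <;> decide
  by_cases h3 : x = "gen"
  · subst h3; and_intros <;> decide
  by_cases h4 : x = "p"
  · subst h4; and_intros <;> decide
  by_cases h5 : x = "par"
  · subst h5; and_intros <;> decide
  by_cases h6 : x = "ill"
  · subst h6; and_intros <;> decide
  by_cases h7 : x = "ine"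
  · subst h7; and_intros <;> decide
  by_cases h8 : x = "in"
  · subst h8; and_intros <;> decide
  by_cases h9 : x = "ela"
  · subst h9; and_intros <;> decide
  by_cases h10 : x = "el"
  · subst h10; and_intros <;> decide
  by_cases h11 : x = "all"
  · subst h11; and_intros <;> decide
  by_cases h12 : x = "ade"
  · subst h12; and_intros <;> decide
  by_cases h13 : x = "ad"
  · subst h13; and_intros <;> decide
  by_cases h14 : x = "abl"
  · subst h14; and_intros <;> decide
  by_cases h15 : x = "tra"
  · subst h15; and_intros <;> decide
  by_cases h16 : x = "tr"
  · subst h16; and_intros <;> decide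
  by_cases h17 : x = "ter"
  · subst h17; and_intros <;> decide
  by_cases h18 : x = "ess"
  · subst h18; and_intros <;> decide
  by_cases h19 : x = "es"
  · subst h19; and_intros <;> decide
  by_cases h20 : x = "abe"
  · subst h20; and_intros <;> decide
  by_cases h21 : x = "ab"
  · subst h21; and_intros <;> decide
  by_cases h22 : x = "kom"
  · subst h22; and_intros <;> decide
  by_cases h23 : x = "com"
  · subst h23; and_intros <;> decide
  simp [pvCaseLookup, PySem.Dict.get?_mk_cons, PySem.Dict.get?, h0, h1, h2, h3, h4, h5, h6, h7, h8, h9, h10, h11, h12, h13, h14, h15, h16, h17, h18, h19, h20, h21, h22, h23, Ne.symm h0, Ne.symm h1, Ne.symm h2, Ne.symm h3, Ne.symm h4, Ne.symm h5, Ne.symm h6, Ne.symm h7, Ne.symm h8, Ne.symm h9, Ne.symm h10, Ne.symm h11, Ne.symm h12, Ne.symm h13, Ne.symm h14, Ne.symm h15, Ne.symm h16, Ne.symm h17, Ne.symm h18, Ne.symm h19, Ne.symm h20, Ne.symm h21, Ne.symm h22, Ne.symm h23]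

-- one row: "the intersection with the alias set is non-empty" ↔ "some token maps to this entry"
lemma pvCond_equiv (toks : List String) (L : List String) (e : Int × String)
    (h : ∀ x, x ∈ L ↔ PySem.Dict.get? pvCaseLookup x = some e) :
    (¬ PySem.Set.inter (PySem.Set.ofList toks) L = []) =
      ((toks.any fun t => PySem.Dict.get? pvCaseLookup t == some e) = true) := by
  apply propext
  rw [← ne_eq, ← List.isEmpty_eq_false_iff, List.isEmpty_eq_false_iff_exists_mem, List.any_eq_true]
  constructor
  · rintro ⟨x, hx⟩
    rw [PySem.Set.mem_inter] at hx
    exact ⟨x, (PySem.Set.mem_ofList _ _).mp hx.1, by simpa using (h x).mp hx.2⟩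
  · rintro ⟨x, hx, hg⟩
    exact ⟨x, (PySem.Set.mem_inter _ _ _).mpr
      ⟨(PySem.Set.mem_ofList _ _).mpr hx, (h x).mpr (by simpa using hg)⟩⟩

set_option maxHeartbeats 2000000 in
lemma pvLoopA_eq_chain (toks : List String) :
    pvLoopA (PySem.Set.ofList toks) pvOrder = (pvChain toks pvE).map Prod.snd := by
  have h := pvG_char
  have a0 : (PySem.Dict.get? pvCaseAliases "nom").getD [] = ["n","nom"] := rfl
  have a1 : (PySem.Dict.get? pvCaseAliases "gen").getD [] = ["g","gen"] := rfl
  have a2 : (PySem.Dict.get? pvCaseAliases "par").getD [] = ["p","par"] := rfl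
  have a3 : (PySem.Dict.get? pvCaseAliases "ill").getD [] = ["ill"] := rfl
  have a4 : (PySem.Dict.get? pvCaseAliases "ine").getD [] = ["ine","in"] := rfl
  have a5 : (PySem.Dict.get? pvCaseAliases "ela").getD [] = ["ela","el"] := rfl
  have a6 : (PySem.Dict.get? pvCaseAliases "all").getD [] = ["all"] := rfl
  have a7 : (PySem.Dict.get? pvCaseAliases "ade").getD [] = ["ade","ad"] := rfl
  have a8 : (PySem.Dict.get? pvCaseAliases "abl").getD [] = ["abl"] := rfl
  have a9 : (PySem.Dict.get? pvCaseAliases "tra").getD [] = ["tra","tr"] := rfl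
  have a10 : (PySem.Dict.get? pvCaseAliases "ter").getD [] = ["ter"] := rfl
  have a11 : (PySem.Dict.get? pvCaseAliases "ess").getD [] = ["ess","es"] := rfl
  have a12 : (PySem.Dict.get? pvCaseAliases "abe").getD [] = ["abe","ab"] := rfl
  have a13 : (PySem.Dict.get? pvCaseAliases "kom").getD [] = ["kom","com"] := rfl
  simp only [pvLoopA, pvOrder, pvChain, pvE, a0, a1, a2, a3, a4, a5, a6, a7, a8, a9, a10, a11,
    a12, a13, ne_eq, Option.map_some, Option.map_none, apply_ite (Option.map Prod.snd),
    pvCond_equiv toks ["n","nom"] (0,"nom") (fun x => (h x).1),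
    pvCond_equiv toks ["g","gen"] (1,"gen") (fun x => (h x).2.1),
    pvCond_equiv toks ["p","par"] (2,"par") (fun x => (h x).2.2.1),
    pvCond_equiv toks ["ill"] (3,"ill") (fun x => (h x).2.2.2.1),
    pvCond_equiv toks ["ine","in"] (4,"ine") (fun x => (h x).2.2.2.2.1),
    pvCond_equiv toks ["ela","el"] (5,"ela") (fun x => (h x).2.2.2.2.2.1),
    pvCond_equiv toks ["all"] (6,"all") (fun x => (h x).2.2.2.2.2.2.1),
    pvCond_equiv toks ["ade","ad"] (7,"ade") (fun x => (h x).2.2.2.2.2.2.2.1),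
    pvCond_equiv toks ["abl"] (8,"abl") (fun x => (h x).2.2.2.2.2.2.2.2.1),
    pvCond_equiv toks ["tra","tr"] (9,"tra") (fun x => (h x).2.2.2.2.2.2.2.2.2.1),
    pvCond_equiv toks ["ter"] (10,"ter") (fun x => (h x).2.2.2.2.2.2.2.2.2.2.1),
    pvCond_equiv toks ["ess","es"] (11,"ess") (fun x => (h x).2.2.2.2.2.2.2.2.2.2.2.1),
    pvCond_equiv toks ["abe","ab"] (12,"abe") (fun x => (h x).2.2.2.2.2.2.2.2.2.2.2.2.1),
    pvCond_equiv toks ["kom","com"] (13,"kom") (fun x => (h x).2.2.2.2.2.2.2.2.2.2.2.2.2)]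

lemma pvOfList_nil {α : Type} [BEq α] [LawfulBEq α] (xs : List α) :
    PySem.Set.ofList xs = [] ↔ xs = [] := by
  constructor
  · intro h
    cases xs with
    | nil => rfl
    | cons x xs =>
      have hx : x ∈ PySem.Set.ofList (x :: xs) := (PySem.Set.mem_ofList _ _).mpr (by simp)
      rw [h] at hx
      simp at hx
  · rintro rfl; rfl

-- ===== VERDICT (by name: the statement is the Claim_ definition above) =====
theorem extract_case_from_form_spec : Claim_equal_extract_case_from_form := by
  intro form _
  unfold Spec_extract_case_from_form extract_case_from_form extract_case_from_form_alt
  by_cases hf : form = ""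
  · simp [hf]
  · rw [if_neg hf, if_neg hf]
    set toks := PySem.Str.split₀ (PySem.Str.strip (PySem.Str.lower form)) with htoks
    rw [pvFoldB_eq_chain]
    by_cases hn : PySem.Set.ofList toks = []
    · rw [if_pos hn]
      rw [(pvOfList_nil toks).mp hn, pvChain_nil]
    · rw [if_neg hn, pvLoopA_eq_chain]
      cases pvChain toks pvE <;> rfl
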